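-- pv_equiv track=rewrite | github.com/madebagus/bot | binance_bot/routers/bot_trading_actual.py | score_trends
-- ===== SOURCE A (Python) =====
-- def score_trends(trends):
--     """Score the trends"""
--     score = 0
--     for trend in trends:
--         if trend == 'BUY':
--             score += 1
--         elif trend == 'SELL':
--             score -= 1
--         elif trend == 'No Trade':
--             score = 0
--     return score
-- ===== SOURCE B (Python) =====
-- def score_trends(trends):
--     """Score the trends"""
--     tail = []
--     for trend in reversed(trends):
--         if trend == 'No Trade':
--             break
--         tail.append(trend)
--     return tail.count('BUY') - tail.count('SELL')
-- ===== Notes on version B (the rewrite author's own statement) =====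
-- stated objective: alternative
-- what changed: Replaces A's left-to-right accumulating scan (with in-place reset) by a backwards scan that collects the suffix after the last 'No Trade' and returns count('BUY') - count('SELL') over that tail.
import Mathlib
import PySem

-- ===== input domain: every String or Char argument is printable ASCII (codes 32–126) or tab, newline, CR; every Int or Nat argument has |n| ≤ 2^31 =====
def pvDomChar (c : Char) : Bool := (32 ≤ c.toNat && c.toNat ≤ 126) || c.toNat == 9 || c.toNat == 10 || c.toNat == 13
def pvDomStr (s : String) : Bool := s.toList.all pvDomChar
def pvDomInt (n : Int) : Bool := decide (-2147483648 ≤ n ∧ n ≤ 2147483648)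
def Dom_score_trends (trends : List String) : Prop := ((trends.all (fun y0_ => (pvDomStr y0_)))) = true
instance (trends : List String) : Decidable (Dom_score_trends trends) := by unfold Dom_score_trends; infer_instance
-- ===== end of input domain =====

-- B replaces A's single accumulating scan (reset on 'No Trade') by a backwards
-- scan collecting the tail after the last 'No Trade', then count BUY minus SELL
-- over that tail (objective: alternative decomposition, same cost).


-- ===== PORT A =====
-- literal port of A: one left-to-right fold over the list with an Int accumulator
def score_trends (trends : List String) : Int :=
  trends.foldl
    (fun score trend =>
      if trend = "BUY" then score + 1
      else if trend = "SELL" then score - 1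
      else if trend = "No Trade" then 0
      else score)
    0

-- ===== PORT B =====
-- Source B's backwards loop with break: collect elements of reversed(trends) until 'No Trade'
def pvCollectTail : List String → List String
  | [] => []
  | t :: rest => if t = "No Trade" then [] else t :: pvCollectTail rest

def score_trends_alt (trends : List String) : Int :=
  let tail := pvCollectTail trends.reverse
  (PySem.List.count tail "BUY" : Int) - (PySem.List.count tail "SELL" : Int)

-- ===== PRECONDITION & SPEC =====
def Spec_score_trends (trends : List String) (out : Int) : Prop := out = score_trends_alt trends
instance (trends : List String) (out : Int) : Decidable (Spec_score_trends trends out) := by unfold Spec_score_trends; infer_instance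

-- ===== CLAIM (what is proved, stated in full; the proofs are below) =====
def Claim_equal_score_trends : Prop := ∀ (trends : List String), Dom_score_trends trends → Spec_score_trends trends (score_trends trends)

-- ===== LEMMAS AND PROOFS =====
theorem score_trends_eq_alt (trends : List String) :
    score_trends trends = score_trends_alt trends := by
  induction trends using List.reverseRecOn with
  | nil => rfl
  | append_singleton l t ih =>
    simp only [score_trends, List.foldl_append, List.foldl_cons, List.foldl_nil] at *
    simp only [score_trends_alt, List.reverse_append, List.reverse_singleton,
      List.singleton_append, pvCollectTail] at *
    by_cases hb : t = "BUY"
    · simp [hb, PySem.List.count, ih]; ring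
    · by_cases hs : t = "SELL"
      · simp [hs, PySem.List.count, ih]; ring
      · by_cases hn : t = "No Trade"
        · simp [hn, PySem.List.count]
        · simp [hb, hs, hn, PySem.List.count, ih]

-- ===== VERDICT (by name: the statement is the Claim_ definition above) =====
theorem score_trends_spec : Claim_equal_score_trends := by
  intro trends _
  unfold Spec_score_trends
  exact score_trends_eq_alt trends
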